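-- pv_equiv track=rewrite | github.com/hiagokinlevi/cloud-posture-watch | analyzers/aws_iam_analyzer.py | _has_broad_action
-- ===== SOURCE A (Python) =====
-- import fnmatch
--
-- _ADMIN_ACTION_PATTERNS = {
--     "*",
--     "iam:*",
--     "iam:Create*",
--     "iam:Delete*",
--     "iam:Put*",
--     "iam:Attach*",
--     "iam:Update*",
--     "sts:AssumeRole",
-- }
--
-- def _has_broad_action(actions: list[str]) -> bool:
--     for action in actions:
--         normalized = action.lower()
--         if normalized == "iam:passrole":
--             continue
--         for pattern in _ADMIN_ACTION_PATTERNS: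
--             if pattern == "*" and normalized != "*":
--                 continue
--             if fnmatch.fnmatchcase(normalized, pattern.lower()):
--                 return True
--     return False
-- ===== SOURCE B (Python) =====
-- def _has_broad_action(actions: list[str]) -> bool:
--     # Single pass, direct tests: every granular iam:...* pattern is subsumed by
--     # the "iam:" prefix, "*" only matched an exact "*", and iam:passrole is skipped.
--     return any(
--         n == "*" or n == "sts:assumerole" or n.startswith("iam:")
--         for n in (a.lower() for a in actions)
--         if n != "iam:passrole"
--     )
-- ===== Notes on version B (the rewrite author's own statement) =====
-- stated objective: simpler
-- what changed: Replaced the nested scan over an 8-pattern fnmatch set with a single pass using three direct string tests (exact '*', exact 'sts:assumerole', prefix 'iam:'), dropping the pattern set and the fnmatch import entirely.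
import Mathlib
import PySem

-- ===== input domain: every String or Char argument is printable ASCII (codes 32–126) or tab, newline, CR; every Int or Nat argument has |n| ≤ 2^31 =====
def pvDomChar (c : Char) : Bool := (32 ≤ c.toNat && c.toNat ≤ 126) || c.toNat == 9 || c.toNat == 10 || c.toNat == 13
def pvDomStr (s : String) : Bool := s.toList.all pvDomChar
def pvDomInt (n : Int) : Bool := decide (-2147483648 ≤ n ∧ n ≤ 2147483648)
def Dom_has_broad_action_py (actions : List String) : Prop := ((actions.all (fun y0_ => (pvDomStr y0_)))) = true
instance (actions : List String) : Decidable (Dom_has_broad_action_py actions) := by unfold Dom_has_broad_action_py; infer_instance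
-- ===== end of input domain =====

-- B replaces the fnmatch pattern-set scan by one pass with three direct string tests (simpler).

-- ===== PORT A =====
-- the module-level set _ADMIN_ACTION_PATTERNS (distinct literals; the boolean result does not depend on set iteration order)
def pvAdminPatterns : List String :=
  ["*", "iam:*", "iam:Create*", "iam:Delete*", "iam:Put*", "iam:Attach*", "iam:Update*", "sts:AssumeRole"]

-- hand port of fnmatch.fnmatchcase; exact for patterns built from literal characters and '*'
-- (the only patterns occurring in pvAdminPatterns; '?', '[', ']' are not treated as wildcards)
def pvFnmatch : List Char → List Char → Bool
  | [], [] => true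
  | [], c :: p => c == '*' && pvFnmatch [] p
  | _ :: _, [] => false
  | a :: s, c :: p =>
    if c == '*' then pvFnmatch (a :: s) p || pvFnmatch s (c :: p)
    else a == c && pvFnmatch s p
termination_by s p => s.length + p.length

-- the inner 'for pattern in _ADMIN_ACTION_PATTERNS' loop
def pvInnerLoop (normalized : String) : List String → Bool
  | [] => false
  | pat :: rest =>
    if pat == "*" && normalized != "*" then pvInnerLoop normalized rest
    else if pvFnmatch normalized.toList (PySem.Str.lower pat).toList then true
    else pvInnerLoop normalized rest

def has_broad_action_py : List String → Bool
  | [] => false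
  | action :: rest =>
    let normalized := PySem.Str.lower action
    if normalized == "iam:passrole" then has_broad_action_py rest
    else if pvInnerLoop normalized pvAdminPatterns then true
    else has_broad_action_py rest

-- ===== PORT B =====
def has_broad_action_py_alt (actions : List String) : Bool :=
  actions.any (fun a =>
    let n := PySem.Str.lower a
    n != "iam:passrole" && (n == "*" || n == "sts:assumerole" || PySem.Str.startswith n "iam:"))

-- ===== PRECONDITION & SPEC =====
def Spec_has_broad_action_py (actions : List String) (out : Bool) : Prop := out = has_broad_action_py_alt actions
instance (actions : List String) (out : Bool) : Decidable (Spec_has_broad_action_py actions out) := by unfold Spec_has_broad_action_py; infer_instance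

-- ===== CLAIM (what is proved, stated in full; the proofs are below) =====
def Claim_equal_has_broad_action_py : Prop := ∀ (actions : List String), Dom_has_broad_action_py actions → Spec_has_broad_action_py actions (has_broad_action_py actions)

-- ===== LEMMAS AND PROOFS =====

theorem pvFnmatch_star (s : List Char) : pvFnmatch s ['*'] = true := by
  induction s with
  | nil => simp [pvFnmatch]
  | cons a s ih => simp [pvFnmatch, ih]

theorem pvFnmatch_lit_star (l : List Char) (hl : '*' ∉ l) (s : List Char) :
    pvFnmatch s (l ++ ['*']) = l.isPrefixOf s := by
  induction l generalizing s with
  | nil => simp [pvFnmatch_star, List.isPrefixOf]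
  | cons c l ih =>
    simp only [List.mem_cons, not_or] at hl
    have hc : c ≠ '*' := fun h => hl.1 h.symm
    cases s with
    | nil =>
      have hcb : (c == '*') = false := by simp [hc]
      simp [pvFnmatch, hcb, List.isPrefixOf]
    | cons a s =>
      simp only [List.cons_append, pvFnmatch, if_neg (by simp [hc] : ¬((c == '*') = true)),
        ih hl.2 s, List.isPrefixOf]
      rw [Bool.beq_comm]

theorem pvFnmatch_lit (l : List Char) (hl : '*' ∉ l) (s : List Char) :
    pvFnmatch s l = (s == l) := by
  induction l generalizing s with
  | nil => cases s <;> simp [pvFnmatch]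
  | cons c l ih =>
    simp only [List.mem_cons, not_or] at hl
    have hc : c ≠ '*' := fun h => hl.1 h.symm
    cases s with
    | nil =>
      have hcb : (c == '*') = false := by simp [hc]
      simp [pvFnmatch, hcb]
    | cons a s => simp [pvFnmatch, hc, ih hl.2]

theorem pvPrefix_mono (n : String) (l : List Char)
    (h : ("iam:".toList).isPrefixOf l = true) :
    l.isPrefixOf n.toList = true → ("iam:".toList).isPrefixOf n.toList = true := by
  intro h2
  rw [List.isPrefixOf_iff_prefix] at *
  exact h.trans h2

theorem pvStartswith_eq_isPrefixOf (m : String) :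
    PySem.Str.startswith m "iam:" = ("iam:".toList).isPrefixOf m.toList := by
  rw [Bool.eq_iff_iff]
  simp [PySem.Chars.startswith_iff, List.isPrefixOf_iff_prefix]

theorem pvStringEq_toList (m t : String) : (m == t) = (m.toList == t.toList) := by
  rw [Bool.eq_iff_iff]
  constructor
  · intro h; simp_all
  · intro h; simp only [beq_iff_eq] at *; exact String.ext h

theorem pvInnerLoop_eq (n : String) :
    pvInnerLoop n pvAdminPatterns
      = (n == "*" || n == "sts:assumerole" || PySem.Str.startswith n "iam:") := by
  have e1 : PySem.Str.lower "*" = "*" := by decide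
  have e2 : PySem.Str.lower "iam:*" = "iam:*" := by decide
  have e3 : PySem.Str.lower "iam:Create*" = "iam:create*" := by decide
  have e4 : PySem.Str.lower "iam:Delete*" = "iam:delete*" := by decide
  have e5 : PySem.Str.lower "iam:Put*" = "iam:put*" := by decide
  have e6 : PySem.Str.lower "iam:Attach*" = "iam:attach*" := by decide
  have e7 : PySem.Str.lower "iam:Update*" = "iam:update*" := by decide
  have e8 : PySem.Str.lower "sts:AssumeRole" = "sts:assumerole" := by decide
  simp only [pvInnerLoop, pvAdminPatterns, e1, e2, e3, e4, e5, e6, e7, e8]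
  rw [show ("iam:*" : String).toList = "iam:".toList ++ ['*'] from by decide,
      show ("iam:create*" : String).toList = "iam:create".toList ++ ['*'] from by decide,
      show ("iam:delete*" : String).toList = "iam:delete".toList ++ ['*'] from by decide,
      show ("iam:put*" : String).toList = "iam:put".toList ++ ['*'] from by decide,
      show ("iam:attach*" : String).toList = "iam:attach".toList ++ ['*'] from by decide,
      show ("iam:update*" : String).toList = "iam:update".toList ++ ['*'] from by decide]
  rw [pvFnmatch_lit_star _ (by decide), pvFnmatch_lit_star _ (by decide),
      pvFnmatch_lit_star _ (by decide), pvFnmatch_lit_star _ (by decide),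
      pvFnmatch_lit_star _ (by decide), pvFnmatch_lit_star _ (by decide),
      pvFnmatch_lit ("sts:assumerole".toList) (by decide), pvStartswith_eq_isPrefixOf]
  by_cases hp : ("iam:".toList).isPrefixOf n.toList = true
  · -- the "iam:*" entry fires on the A side, the "iam:" prefix test on the B side
    simp only [hp]
    by_cases h1 : n = "*" <;> simp [h1]
  · have hp' : ("iam:".toList).isPrefixOf n.toList = false := by
      cases h : ("iam:".toList).isPrefixOf n.toList
      · rfl
      · exact absurd h hp
    have h3 : ("iam:create".toList).isPrefixOf n.toList = false := by
      cases h : ("iam:create".toList).isPrefixOf n.toList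
      · rfl
      · exact absurd (pvPrefix_mono n _ (by decide) h) hp
    have h4 : ("iam:delete".toList).isPrefixOf n.toList = false := by
      cases h : ("iam:delete".toList).isPrefixOf n.toList
      · rfl
      · exact absurd (pvPrefix_mono n _ (by decide) h) hp
    have h5 : ("iam:put".toList).isPrefixOf n.toList = false := by
      cases h : ("iam:put".toList).isPrefixOf n.toList
      · rfl
      · exact absurd (pvPrefix_mono n _ (by decide) h) hp
    have h6 : ("iam:attach".toList).isPrefixOf n.toList = false := by
      cases h : ("iam:attach".toList).isPrefixOf n.toList
      · rfl
      · exact absurd (pvPrefix_mono n _ (by decide) h) hp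
    have h7 : ("iam:update".toList).isPrefixOf n.toList = false := by
      cases h : ("iam:update".toList).isPrefixOf n.toList
      · rfl
      · exact absurd (pvPrefix_mono n _ (by decide) h) hp
    have hsts : (n == ("sts:assumerole" : String)) = (n.toList == "sts:assumerole".toList) :=
      pvStringEq_toList n "sts:assumerole"
    simp only [hp', h3, h4, h5, h6, h7, hsts]
    by_cases h1 : n = "*"
    · simp [h1, pvFnmatch_star]
    · have hb1 : (n == ("*" : String)) = false := by simp [h1]
      simp only [hb1, Bool.false_or]
      rw [Bool.eq_iff_iff]; simp
      exact fun h => absurd h h1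

theorem pv_main (actions : List String) :
    has_broad_action_py actions = has_broad_action_py_alt actions := by
  induction actions with
  | nil => rfl
  | cons a rest ih =>
    by_cases hp : PySem.Str.lower a = "iam:passrole"
    · rw [show has_broad_action_py (a :: rest) = has_broad_action_py rest from by
          simp [has_broad_action_py, hp],
        show has_broad_action_py_alt (a :: rest) = has_broad_action_py_alt rest from by
          simp [has_broad_action_py_alt, hp]]
      exact ih
    · have hA : has_broad_action_py (a :: rest)
          = (pvInnerLoop (PySem.Str.lower a) pvAdminPatterns || has_broad_action_py rest) := by
        simp only [has_broad_action_py]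
        rw [if_neg (by simp [hp])]
        cases h : pvInnerLoop (PySem.Str.lower a) pvAdminPatterns <;> simp
      have hB : has_broad_action_py_alt (a :: rest)
          = ((PySem.Str.lower a == "*" || PySem.Str.lower a == "sts:assumerole"
              || PySem.Str.startswith (PySem.Str.lower a) "iam:")
             || has_broad_action_py_alt rest) := by
        simp only [has_broad_action_py_alt, List.any_cons]
        congr 1
        simp [hp]
      rw [hA, hB, pvInnerLoop_eq, ih]

-- ===== VERDICT (by name: the statement is the Claim_ definition above) =====
theorem has_broad_action_py_spec : Claim_equal_has_broad_action_py := by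
  intro actions _
  unfold Spec_has_broad_action_py
  exact pv_main actions
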